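-- pv_equiv track=rewrite | github.com/YEJPark/Master-s-thesis | Celltype_frequency _analysis.py | find_class
-- ===== SOURCE A (Python) =====
-- def find_class(cell_type):
--     cell_class_dict = {
--         'Endothelial': ['Lymphatic', 'VE_Venous', 'VE_Capillary_A', 'VE_Arterial', 'VE_Capillary_B', 'VE_Peribronchial'],
--         'Epithelial': ['Basal', 'ATII', 'ATI', 'Ciliated', 'Club', 'Goblet', 'Mesothelial', 'Aberrant_Basaloid', 'Ionocyte', 'PNEC'],
--         'Lymphoid': ['NK', 'B', 'T', 'B_Plasma', 'ILC_A', 'T_Cytotoxic', 'T_Regulatory', 'ILC_B'],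
--         'Myeloid': ['ncMonocyte', 'Macrophage_Alveolar', 'cMonocyte', 'Macrophage', 'cDC2', 'cDC1', 'DC_Langerhans', 'Mast', 'pDC', 'DC_Mature'],
--         'Stromal': ['Fibroblast', 'Myofibroblast', 'SMC', 'Pericyte']
--     }
--
--     for cls, types in cell_class_dict.items():
--         if cell_type in types:
--             return cls
--     return None
-- ===== SOURCE B (Python) =====
-- # A flat (type, class) table kept sorted by type name; lookup by hand-written
-- # binary search instead of A's class-by-class loop with list membership.
-- PAIRS = [
--     ("ATI", "Epithelial"),
--     ("ATII", "Epithelial"),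
--     ("Aberrant_Basaloid", "Epithelial"),
--     ("B", "Lymphoid"),
--     ("B_Plasma", "Lymphoid"),
--     ("Basal", "Epithelial"),
--     ("Ciliated", "Epithelial"),
--     ("Club", "Epithelial"),
--     ("DC_Langerhans", "Myeloid"),
--     ("DC_Mature", "Myeloid"),
--     ("Fibroblast", "Stromal"),
--     ("Goblet", "Epithelial"),
--     ("ILC_A", "Lymphoid"),
--     ("ILC_B", "Lymphoid"),
--     ("Ionocyte", "Epithelial"),
--     ("Lymphatic", "Endothelial"),
--     ("Macrophage", "Myeloid"),
--     ("Macrophage_Alveolar", "Myeloid"),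
--     ("Mast", "Myeloid"),
--     ("Mesothelial", "Epithelial"),
--     ("Myofibroblast", "Stromal"),
--     ("NK", "Lymphoid"),
--     ("PNEC", "Epithelial"),
--     ("Pericyte", "Stromal"),
--     ("SMC", "Stromal"),
--     ("T", "Lymphoid"),
--     ("T_Cytotoxic", "Lymphoid"),
--     ("T_Regulatory", "Lymphoid"),
--     ("VE_Arterial", "Endothelial"),
--     ("VE_Capillary_A", "Endothelial"),
--     ("VE_Capillary_B", "Endothelial"),
--     ("VE_Peribronchial", "Endothelial"),
--     ("VE_Venous", "Endothelial"),
--     ("cDC1", "Myeloid"),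
--     ("cDC2", "Myeloid"),
--     ("cMonocyte", "Myeloid"),
--     ("ncMonocyte", "Myeloid"),
--     ("pDC", "Myeloid"),
-- ]
--
-- def find_class(cell_type):
--     lo, hi = 0, len(PAIRS)
--     while lo < hi:
--         mid = (lo + hi) // 2
--         k, v = PAIRS[mid]
--         if k < cell_type:
--             lo = mid + 1
--         elif cell_type < k:
--             hi = mid
--         else:
--             return v
--     return None
-- ===== Notes on version B (the rewrite author's own statement) =====
-- stated objective: alternative
-- what changed: Replaced the class-by-class loop with list-membership tests by a flat (type, class) table kept sorted by type name and a hand-written binary search over it.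
import Mathlib
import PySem

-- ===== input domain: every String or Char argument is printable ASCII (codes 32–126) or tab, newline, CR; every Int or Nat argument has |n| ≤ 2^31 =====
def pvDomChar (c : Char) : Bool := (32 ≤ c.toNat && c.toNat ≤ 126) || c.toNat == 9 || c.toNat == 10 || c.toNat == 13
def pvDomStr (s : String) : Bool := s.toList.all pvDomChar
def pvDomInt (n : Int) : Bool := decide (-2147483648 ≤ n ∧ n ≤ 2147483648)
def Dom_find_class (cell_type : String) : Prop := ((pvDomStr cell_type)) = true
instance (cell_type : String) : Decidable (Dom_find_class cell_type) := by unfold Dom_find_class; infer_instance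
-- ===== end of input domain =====

-- B replaces A's class-by-class loop with list-membership tests by a flat
-- (type, class) table sorted by type name and a hand-written binary search
-- (alternative algorithm; same results).

-- ===== PORT A =====
-- A's dict literal, as an insertion-ordered association list.
def pvCellClassDictA : List (String × List String) :=
  [ ("Endothelial", ["Lymphatic", "VE_Venous", "VE_Capillary_A", "VE_Arterial", "VE_Capillary_B", "VE_Peribronchial"])
  , ("Epithelial", ["Basal", "ATII", "ATI", "Ciliated", "Club", "Goblet", "Mesothelial", "Aberrant_Basaloid", "Ionocyte", "PNEC"])
  , ("Lymphoid", ["NK", "B", "T", "B_Plasma", "ILC_A", "T_Cytotoxic", "T_Regulatory", "ILC_B"])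
  , ("Myeloid", ["ncMonocyte", "Macrophage_Alveolar", "cMonocyte", "Macrophage", "cDC2", "cDC1", "DC_Langerhans", "Mast", "pDC", "DC_Mature"])
  , ("Stromal", ["Fibroblast", "Myofibroblast", "SMC", "Pericyte"]) ]

-- the 'for cls, types in ….items(): if cell_type in types: return cls' loop
def pvFindLoop : List (String × List String) → String → Option String
  | [], _ => none
  | (cls, types) :: rest, ct => if types.contains ct then some cls else pvFindLoop rest ct

def find_class (cell_type : String) : Option String :=
  pvFindLoop pvCellClassDictA cell_type

-- ===== PORT B =====
-- B's flat table, sorted by type name (Source B's PAIRS literal).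
def pvPairs : List (String × String) :=
  [ ("ATI", "Epithelial"), ("ATII", "Epithelial"), ("Aberrant_Basaloid", "Epithelial")
  , ("B", "Lymphoid"), ("B_Plasma", "Lymphoid"), ("Basal", "Epithelial")
  , ("Ciliated", "Epithelial"), ("Club", "Epithelial"), ("DC_Langerhans", "Myeloid")
  , ("DC_Mature", "Myeloid"), ("Fibroblast", "Stromal"), ("Goblet", "Epithelial")
  , ("ILC_A", "Lymphoid"), ("ILC_B", "Lymphoid"), ("Ionocyte", "Epithelial")
  , ("Lymphatic", "Endothelial"), ("Macrophage", "Myeloid"), ("Macrophage_Alveolar", "Myeloid")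
  , ("Mast", "Myeloid"), ("Mesothelial", "Epithelial"), ("Myofibroblast", "Stromal")
  , ("NK", "Lymphoid"), ("PNEC", "Epithelial"), ("Pericyte", "Stromal")
  , ("SMC", "Stromal"), ("T", "Lymphoid"), ("T_Cytotoxic", "Lymphoid")
  , ("T_Regulatory", "Lymphoid"), ("VE_Arterial", "Endothelial"), ("VE_Capillary_A", "Endothelial")
  , ("VE_Capillary_B", "Endothelial"), ("VE_Peribronchial", "Endothelial"), ("VE_Venous", "Endothelial")
  , ("cDC1", "Myeloid"), ("cDC2", "Myeloid"), ("cMonocyte", "Myeloid")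
  , ("ncMonocyte", "Myeloid"), ("pDC", "Myeloid") ]

-- Source B's 'while lo < hi' binary-search loop; the fuel argument (the initial
-- interval width, which strictly shrinks) only makes the recursion structural.
def pvBsearch (ct : String) : Nat → Nat → Nat → Option String
  | 0, _, _ => none
  | fuel + 1, lo, hi =>
    if lo < hi then
      let mid := (lo + hi) / 2
      match pvPairs[mid]? with
      | none => none   -- unreachable for 0 ≤ lo ≤ hi ≤ len; PAIRS[mid] never raises there
      | some (k, v) =>
        -- Python's 'k < cell_type' on str = code-point lexicographic < on .toList (PYSEM.md)
        if k.toList < ct.toList then pvBsearch ct fuel (mid + 1) hi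
        else if ct.toList < k.toList then pvBsearch ct fuel lo mid
        else some v
    else none

def find_class_alt (cell_type : String) : Option String :=
  pvBsearch cell_type pvPairs.length 0 pvPairs.length

-- ===== PRECONDITION & SPEC =====
def Spec_find_class (cell_type : String) (out : Option String) : Prop := out = find_class_alt cell_type
instance (cell_type : String) (out : Option String) : Decidable (Spec_find_class cell_type out) := by unfold Spec_find_class; infer_instance

-- ===== CLAIM (what is proved, stated in full; the proofs are below) =====
def Claim_equal_find_class : Prop := ∀ (cell_type : String), Dom_find_class cell_type → Spec_find_class cell_type (find_class cell_type)

-- ===== LEMMAS AND PROOFS =====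

-- if A's loop returns a class, the queried type occurs in one of the type lists
theorem pvFindLoop_some_mem (d : List (String × List String)) (ct : String) (cls : String)
    (h : pvFindLoop d ct = some cls) : ∃ p ∈ d, ct ∈ p.2 := by
  induction d with
  | nil => simp [pvFindLoop] at h
  | cons hd rest ih =>
    obtain ⟨c, types⟩ := hd
    by_cases hc : types.contains ct
    · exact ⟨(c, types), by simp, by simpa using hc⟩
    · simp only [pvFindLoop, hc, Bool.false_eq_true, if_false] at h
      obtain ⟨p, hp, hm⟩ := ih h
      exact ⟨p, List.mem_cons_of_mem _ hp, hm⟩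

-- every type name in A's table is a key of B's flat table
theorem pvTable_keys_sub : ∀ p ∈ pvCellClassDictA, ∀ a ∈ p.2, a ∈ pvPairs.map Prod.fst := by
  decide

-- binary search returns none for any string that is not a key of the table
theorem pvBsearch_notmem (ct : String) (hct : ct ∉ pvPairs.map Prod.fst) :
    ∀ fuel lo hi, pvBsearch ct fuel lo hi = none := by
  intro fuel
  induction fuel with
  | zero => intro lo hi; rfl
  | succ n ih =>
    intro lo hi
    unfold pvBsearch
    by_cases hlt : lo < hi
    · rw [if_pos hlt]
      cases hget : pvPairs[(lo + hi) / 2]? with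
      | none => simp only [hget]
      | some p =>
        obtain ⟨k, v⟩ := p
        have hkmem : k ∈ pvPairs.map Prod.fst := by
          have : (k, v) ∈ pvPairs := List.mem_of_getElem? hget
          exact List.mem_map.mpr ⟨(k, v), this, rfl⟩
        simp only [hget]
        by_cases h1 : k.toList < ct.toList
        · rw [if_pos h1]
          exact ih ((lo + hi) / 2 + 1) hi
        · rw [if_neg h1]
          by_cases h2 : ct.toList < k.toList
          · rw [if_pos h2]
            exact ih lo ((lo + hi) / 2)
          · exfalso
            have hk : k = ct := by
              have : k.toList = ct.toList := le_antisymm (not_lt.mp h2) (not_lt.mp h1)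
              exact String.ext (by simpa [String.toList] using this)
            exact hct (hk ▸ hkmem)
    · rw [if_neg hlt]

-- ===== VERDICT (by name: the statement is the Claim_ definition above) =====
set_option maxRecDepth 4000 in
theorem find_class_spec : Claim_equal_find_class := by
  intro ct _
  show find_class ct = find_class_alt ct
  by_cases hm : ct ∈ pvPairs.map Prod.fst
  · fin_cases hm <;> decide
  · have hA : find_class ct = none := by
      cases hfc : find_class ct with
      | none => rfl
      | some cls =>
        obtain ⟨p, hp, hin⟩ := pvFindLoop_some_mem pvCellClassDictA ct cls hfc
        exact absurd (pvTable_keys_sub p hp ct hin) hm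
    have hB : find_class_alt ct = none :=
      pvBsearch_notmem ct hm pvPairs.length 0 pvPairs.length
    rw [hA, hB]
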